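-- pv_equiv track=rewrite | github.com/whitepaper2/algoDiary | algo-improve/0x55-timeSleep.py | transport2
-- ===== SOURCE A (Python) =====
-- def transport2(nums):
--     """
--     环路运输，nums[i]+nums[j]+abs(i-j)
--     :param nums:
--     :return:
--     """
--     n = len(nums)
--     A = [0] + nums * 2
--     N = n // 2
--     res = 0
--     left, right = 1, 1
--     queue = [0] * (2 * n + 1)  # 递减队列, 值=queue[i]-i
--     for i in range(1, n + N):
--         while left <= right and i - queue[left] > N:
--             left += 1
--         res = max(res, A[i] + i + A[queue[left]] - queue[left])
--         while left <= right and A[queue[right]] - queue[right] < A[i] - i: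
--             right -= 1
--         right += 1
--         queue[right] = i
--     return res
-- ===== SOURCE B (Python) =====
-- def transport2(nums):
--     """
--     环路运输，nums[i]+nums[j]+abs(i-j)
--     :param nums:
--     :return:
--     """
--     n = len(nums)
--     A = [0] + nums * 2
--     N = n // 2
--     res = 0
--     for i in range(1, n + N):
--         for j in range(max(0, i - N), i):
--             res = max(res, A[i] + i + A[j] - j)
--     return res
-- ===== Notes on version B (the rewrite author's own statement) =====
-- stated objective: simpler
-- what changed: The maintained monotonic deque (array + left/right pointers) is replaced by a direct nested loop that, for each i, scans the whole window [max(0,i-N), i-1] for the best partner j.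
import Mathlib
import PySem

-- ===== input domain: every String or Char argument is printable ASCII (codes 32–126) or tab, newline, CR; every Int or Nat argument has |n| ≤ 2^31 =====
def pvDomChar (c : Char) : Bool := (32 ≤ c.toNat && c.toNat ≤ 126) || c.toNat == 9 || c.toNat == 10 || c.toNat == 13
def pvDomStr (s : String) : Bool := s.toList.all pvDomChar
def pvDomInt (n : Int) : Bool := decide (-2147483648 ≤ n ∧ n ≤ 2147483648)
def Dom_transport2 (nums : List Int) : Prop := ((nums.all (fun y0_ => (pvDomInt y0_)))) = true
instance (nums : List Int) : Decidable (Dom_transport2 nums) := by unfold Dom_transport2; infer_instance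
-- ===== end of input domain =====

-- B replaces A's monotonic deque with a plain nested window scan (simpler, not faster).
-- ===== PORT A =====
-- 'while left <= right and i - queue[left] > N: left += 1'  (index left is provably in range on every run, so getD is exact)
def popL (queue : List Int) (N i left right : Int) : Int :=
  if _h : left ≤ right ∧ i - queue.getD left.toNat 0 > N then
    popL queue N i (left + 1) right
  else left
termination_by (right + 1 - left).toNat
decreasing_by omega

-- 'while left <= right and A[queue[right]] - queue[right] < A[i] - i: right -= 1'
def popR (A queue : List Int) (i left right : Int) : Int :=
  if _h : left ≤ right ∧
      A.getD (queue.getD right.toNat 0).toNat 0 - queue.getD right.toNat 0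
        < A.getD i.toNat 0 - i then
    popR A queue i left (right - 1)
  else right
termination_by (right + 1 - left).toNat
decreasing_by omega

-- one iteration of A's for-loop; state = (res, left, right, queue)
def stepA (A : List Int) (N : Int) (st : Int × Int × Int × List Int) (i : Int) :
    Int × Int × Int × List Int :=
  let (res, left, right, q) := st
  let left' := popL q N i left right
  let res' := max res (A.getD i.toNat 0 + i + A.getD (q.getD left'.toNat 0).toNat 0
                        - q.getD left'.toNat 0)
  let right' := popR A q i left' right + 1
  (res', left', right', q.set right'.toNat i)

def transport2 (nums : List Int) : Int :=
  let n : Int := (nums.length : Int)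
  let A : List Int := 0 :: (nums ++ nums)
  let N : Int := PySem.Int.floordiv n 2
  let queue : List Int := List.replicate (2 * nums.length + 1) 0
  ((PySem.List.pyRange 1 (n + N) 1).foldl (stepA A N) (0, 1, 1, queue)).1

-- ===== PORT B =====
def innerB (A : List Int) (N : Int) (res i : Int) : Int :=
  (PySem.List.pyRange (max 0 (i - N)) i 1).foldl
    (fun r j => max r (A.getD i.toNat 0 + i + A.getD j.toNat 0 - j)) res

def transport2_alt (nums : List Int) : Int :=
  let n : Int := (nums.length : Int)
  let A : List Int := 0 :: (nums ++ nums)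
  let N : Int := PySem.Int.floordiv n 2
  (PySem.List.pyRange 1 (n + N) 1).foldl (innerB A N) 0

-- ===== PRECONDITION & SPEC =====
def Spec_transport2 (nums : List Int) (out : Int) : Prop := out = transport2_alt nums
instance (nums : List Int) (out : Int) : Decidable (Spec_transport2 nums out) := by unfold Spec_transport2; infer_instance

-- ===== CLAIM (what is proved, stated in full; the proofs are below) =====
def Claim_equal_transport2 : Prop := ∀ (nums : List Int), Dom_transport2 nums → Spec_transport2 nums (transport2 nums)

-- ===== LEMMAS AND PROOFS =====
-- value tracked by the deque: A[k] - k
def val (A : List Int) (k : Int) : Int := A.getD k.toNat 0 - k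

-- the deque's abstract content: queue[left], queue[left+1], …, queue[right]
def dq (q : List Int) (left right : Int) : List Int :=
  if _h : left ≤ right then q.getD left.toNat 0 :: dq q (left + 1) right else []
termination_by (right + 1 - left).toNat
decreasing_by omega

lemma dq_nil {q : List Int} {left right : Int} (h : right < left) : dq q left right = [] := by
  rw [dq]; simp [not_le.mpr h]

lemma dq_cons {q : List Int} {left right : Int} (h : left ≤ right) :
    dq q left right = q.getD left.toNat 0 :: dq q (left + 1) right := by
  rw [dq]; simp [h]

lemma dq_snoc_aux (q : List Int) : ∀ (k : Nat) (left right : Int),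
    (right - left).toNat ≤ k → left ≤ right →
    dq q left right = dq q left (right - 1) ++ [q.getD right.toNat 0] := by
  intro k
  induction k with
  | zero =>
    intro left right hk h
    have : left = right := by omega
    subst this
    rw [dq_cons h, dq_nil (by omega), dq_nil (by omega)]
    simp
  | succ k ih =>
    intro left right hk h
    by_cases h2 : left = right
    · subst h2
      rw [dq_cons h, dq_nil (by omega), dq_nil (by omega)]
      simp
    · have h3 : left ≤ right - 1 := by omega
      rw [dq_cons h, dq_cons h3, ih (left + 1) right (by omega) (by omega)]
      simp

lemma dq_snoc (q : List Int) {left right : Int} (h : left ≤ right) :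
    dq q left right = dq q left (right - 1) ++ [q.getD right.toNat 0] :=
  dq_snoc_aux q (right - left).toNat left right le_rfl h

lemma dq_set_of_lt (q : List Int) (p : Nat) (v : Int) : ∀ (k : Nat) (left right : Int),
    (right + 1 - left).toNat ≤ k → 0 ≤ left → right < (p : Int) →
    dq (q.set p v) left right = dq q left right := by
  intro k
  induction k with
  | zero => intro left right hk h0 hp; rw [dq_nil (by omega), dq_nil (by omega)]
  | succ k ih =>
    intro left right hk h0 hp
    by_cases h : left ≤ right
    · rw [dq_cons h, dq_cons h, ih (left + 1) right (by omega) (by omega) hp]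
      have hne : p ≠ left.toNat := by omega
      simp [List.getD_eq_getElem?_getD, List.getElem?_set_ne hne]
    · rw [dq_nil (by omega), dq_nil (by omega)]

lemma foldl_max_absorb (f : Int → Int) (c : Int) : ∀ (l : List Int) (res : Int),
    (∀ j ∈ l, f j ≤ c) → c ≤ res →
    l.foldl (fun r j => max r (f j)) res = res := by
  intro l
  induction l with
  | nil => simp
  | cons a t ih =>
    intro res hub hc
    simp only [List.foldl_cons]
    have ha : f a ≤ c := hub a (by simp)
    have : max res (f a) = res := by omega
    rw [this]
    exact ih res (fun j hj => hub j (by simp [hj])) hc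

lemma foldl_max_eq (f : Int → Int) (c : Int) : ∀ (l : List Int) (res : Int),
    (∀ j ∈ l, f j ≤ c) → (∃ j ∈ l, f j = c) →
    l.foldl (fun r j => max r (f j)) res = max res c := by
  intro l
  induction l with
  | nil => rintro res _ ⟨j, hj, _⟩; simp at hj
  | cons a t ih =>
    rintro res hub ⟨j, hj, hfj⟩
    simp only [List.foldl_cons]
    rcases List.mem_cons.mp hj with rfl | hjt
    · rw [hfj]
      exact foldl_max_absorb f c t (max res c) (fun x hx => hub x (by simp [hx]))
        (le_max_right _ _)
    · rw [ih (max res (f a)) (fun x hx => hub x (by simp [hx])) ⟨j, hjt, hfj⟩]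
      have ha : f a ≤ c := hub a (by simp)
      omega

lemma popL_spec (q : List Int) (N i : Int) : ∀ (k : Nat) (left right : Int),
    (right + 1 - left).toNat ≤ k →
    left ≤ popL q N i left right ∧
    (∃ pre, dq q left right = pre ++ dq q (popL q N i left right) right ∧
            ∀ x ∈ pre, i - x > N) ∧
    (right < popL q N i left right ∨
      ¬ (i - q.getD (popL q N i left right).toNat 0 > N)) := by
  intro k
  induction k with
  | zero =>
    intro left right hk
    rw [popL]
    have h1 : ¬ (left ≤ right ∧ i - q.getD left.toNat 0 > N) := by omega
    rw [dif_neg h1]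
    exact ⟨le_rfl, ⟨[], by simp, by simp⟩, Or.inl (by omega)⟩
  | succ k ih =>
    intro left right hk
    rw [popL]
    by_cases h : left ≤ right ∧ i - q.getD left.toNat 0 > N
    · rw [dif_pos h]
      obtain ⟨ha, ⟨pre, hpre, hpreP⟩, hstop⟩ := ih (left + 1) right (by omega)
      refine ⟨by omega, ⟨q.getD left.toNat 0 :: pre, ?_, ?_⟩, hstop⟩
      · rw [dq_cons h.1, hpre]; simp
      · intro x hx
        rcases List.mem_cons.mp hx with rfl | hx'
        · exact h.2
        · exact hpreP x hx'
    · rw [dif_neg h]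
      refine ⟨le_rfl, ⟨[], by simp, by simp⟩, ?_⟩
      by_cases h2 : left ≤ right
      · exact Or.inr (fun hc => h ⟨h2, hc⟩)
      · exact Or.inl (by omega)

lemma popR_spec (A q : List Int) (i : Int) : ∀ (k : Nat) (left right : Int),
    (right + 1 - left).toNat ≤ k → left - 1 ≤ right →
    left - 1 ≤ popR A q i left right ∧
    popR A q i left right ≤ right ∧
    (∃ suf, dq q left right = dq q left (popR A q i left right) ++ suf ∧
            ∀ x ∈ suf, val A x < val A i) ∧
    (popR A q i left right < left ∨
      ¬ (val A (q.getD (popR A q i left right).toNat 0) < val A i)) := by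
  intro k
  induction k with
  | zero =>
    intro left right hk hlr
    rw [popR]
    have h1 : ¬ (left ≤ right ∧
        A.getD (q.getD right.toNat 0).toNat 0 - q.getD right.toNat 0
          < A.getD i.toNat 0 - i) := by omega
    rw [dif_neg h1]
    exact ⟨hlr, le_rfl, ⟨[], by simp, by simp⟩, Or.inl (by omega)⟩
  | succ k ih =>
    intro left right hk hlr
    rw [popR]
    by_cases h : left ≤ right ∧
        A.getD (q.getD right.toNat 0).toNat 0 - q.getD right.toNat 0
          < A.getD i.toNat 0 - i
    · rw [dif_pos h]
      obtain ⟨ha, hb, ⟨suf, hsuf, hsufP⟩, hstop⟩ := ih left (right - 1) (by omega) (by omega)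
      refine ⟨ha, by omega, ⟨suf ++ [q.getD right.toNat 0], ?_, ?_⟩, hstop⟩
      · rw [dq_snoc q h.1, hsuf]; simp
      · intro x hx
        rcases List.mem_append.mp hx with hx' | hx'
        · exact hsufP x hx'
        · simp at hx'
          subst hx'
          simpa [val] using h.2
    · rw [dif_neg h]
      refine ⟨by omega, le_rfl, ⟨[], by simp, by simp⟩, ?_⟩
      by_cases h2 : left ≤ right
      · exact Or.inr (fun hc => h ⟨h2, by simpa [val] using hc⟩)
      · exact Or.inl (by omega)

-- loop invariant: after iterations 1..m the state is (res, left, right, q)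
def DqInv (A : List Int) (n N m : Int) (st : Int × Int × Int × List Int) : Prop :=
  1 ≤ st.2.1 ∧ st.2.1 ≤ st.2.2.1 ∧ st.2.2.1 ≤ m + 1 ∧
  ((st.2.2.2.length : Int) = 2 * n + 1) ∧
  List.Pairwise (· < ·) (dq st.2.2.2 st.2.1 st.2.2.1) ∧
  List.Pairwise (fun a b => val A b ≤ val A a) (dq st.2.2.2 st.2.1 st.2.2.1) ∧
  (∃ d0, dq st.2.2.2 st.2.1 st.2.2.1 = d0 ++ [m]) ∧
  (∀ x ∈ dq st.2.2.2 st.2.1 st.2.2.1, 0 ≤ x ∧ m - N ≤ x ∧ x ≤ m) ∧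
  (∀ j : Int, 0 ≤ j → m - N ≤ j → j ≤ m →
      ∃ x ∈ dq st.2.2.2 st.2.1 st.2.2.1, j ≤ x ∧ val A j ≤ val A x) ∧
  st.1 = (PySem.List.pyRange 1 (m + 1) 1).foldl (innerB A N) 0

lemma step_inv (A : List Int) (n N m : Int) (res left right : Int) (q : List Int)
    (hA : (A.length : Int) = 2 * n + 1)
    (hN : 2 * N ≤ n ∧ n ≤ 2 * N + 1) (_hn : 0 ≤ n)
    (hm : 0 ≤ m) (hi : m + 1 ≤ n + N - 1)
    (h : DqInv A n N m (res, left, right, q)) :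
    DqInv A n N (m + 1) (stepA A N (res, left, right, q) (m + 1)) := by
  obtain ⟨hl1, hlr, hrm, hq, hPlt, hPval, ⟨d0, hd0⟩, hbounds, hcov, hres⟩ := h
  simp only at hl1 hlr hrm hq hPlt hPval hd0 hbounds hcov hres
  have hNpos : 1 ≤ N := by omega
  set i : Int := m + 1 with hidef
  -- ===== the left pop =====
  obtain ⟨hll, ⟨pre, hpre, hpreP⟩, hstopL⟩ :=
    popL_spec q N i (right + 1 - left).toNat left right le_rfl
  set left1 : Int := popL q N i left right with hleft1
  have hd1ne : dq q left1 right ≠ [] := by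
    intro h0
    rw [h0, List.append_nil] at hpre
    have hm_mem : m ∈ dq q left right := by rw [hd0]; simp
    have := hpreP m (hpre ▸ hm_mem)
    omega
  have hl1r : left1 ≤ right := by
    by_contra h'
    exact hd1ne (dq_nil (by omega))
  set head : Int := q.getD left1.toNat 0 with hhead
  have hd1c : dq q left1 right = head :: dq q (left1 + 1) right := dq_cons hl1r
  have hstop : i - head ≤ N := by
    rcases hstopL with h' | h'
    · omega
    · omega
  -- the deque after the left pop is a suffix of the old one
  have hsubl : List.Sublist (dq q left1 right) (dq q left right) := by
    rw [hpre]; exact List.sublist_append_right _ _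
  have hd1mem : ∀ x ∈ dq q left1 right, x ∈ dq q left right := fun x hx => by
    rw [hpre]; exact List.mem_append_right _ hx
  -- last element of the popped deque is still m
  have hlast1 : ∃ d0', dq q left1 right = d0' ++ [m] := by
    have h1 := (List.dropLast_concat_getLast hd1ne).symm
    have h2 : pre ++ ((dq q left1 right).dropLast ++ [(dq q left1 right).getLast hd1ne])
        = d0 ++ [m] := by rw [← h1, ← hpre, hd0]
    rw [← List.append_assoc] at h2
    have h3 := (List.cons_eq_cons.mp (List.append_inj' h2 rfl).2).1
    rw [h3] at h1
    exact ⟨(dq q left1 right).dropLast, h1⟩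
  -- bounds on the elements of the popped deque
  have hbounds1 : ∀ x ∈ dq q left1 right, 0 ≤ x ∧ i - N ≤ x ∧ x ≤ m := by
    intro x hx
    have hb := hbounds x (hd1mem x hx)
    have hhx : head ≤ x := by
      rw [hd1c] at hx
      rcases List.mem_cons.mp hx with rfl | h'
      · exact le_rfl
      · have hp := hPlt.sublist hsubl
        rw [hd1c] at hp
        exact le_of_lt ((List.pairwise_cons.mp hp).1 x h')
    omega
  have hvmax : ∀ x ∈ dq q left1 right, val A x ≤ val A head := by
    intro x hx
    rw [hd1c] at hx
    rcases List.mem_cons.mp hx with rfl | h'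
    · exact le_rfl
    · have hp := hPval.sublist hsubl
      rw [hd1c] at hp
      exact (List.pairwise_cons.mp hp).1 x h'
  have hheadmem : head ∈ dq q left1 right := by rw [hd1c]; simp
  have hheadb := hbounds1 head hheadmem
  -- ===== the res update equals B's inner window scan =====
  have hres' : max res (A.getD i.toNat 0 + i + A.getD head.toNat 0 - head)
      = innerB A N res i := by
    unfold innerB
    rw [foldl_max_eq (fun j => A.getD i.toNat 0 + i + A.getD j.toNat 0 - j)
        (A.getD i.toNat 0 + i + A.getD head.toNat 0 - head) _ res ?hub ?hex]
    case hub =>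
      intro j hj
      rw [PySem.List.mem_pyRange_one] at hj
      have hj0 : 0 ≤ j := by omega
      have hjN : i - N ≤ j := by omega
      have hjm : j ≤ m := by omega
      obtain ⟨x, hx, hjx, hvjx⟩ := hcov j hj0 (by omega) hjm
      have hxd1 : x ∈ dq q left1 right := by
        rw [hpre] at hx
        rcases List.mem_append.mp hx with hx' | hx'
        · exact absurd (hpreP x hx') (by omega)
        · exact hx'
      have := hvmax x hxd1
      simp only [val] at hvjx this
      show A.getD i.toNat 0 + i + A.getD j.toNat 0 - j
        ≤ A.getD i.toNat 0 + i + A.getD head.toNat 0 - head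
      omega
    case hex =>
      refine ⟨head, ?_, rfl⟩
      rw [PySem.List.mem_pyRange_one]
      constructor
      · omega
      · omega
  -- ===== the right pop and the push =====
  obtain ⟨hr1a, hr1b, ⟨suf, hsuf, hsufP⟩, hstopR⟩ :=
    popR_spec A q i (right + 1 - left1).toNat left1 right le_rfl (by omega)
  set right1 : Int := popR A q i left1 right with hright1
  set right' : Int := right1 + 1 with hright'
  set q' : List Int := q.set right'.toNat i with hq'
  have hr'len : (right'.toNat : Int) < (q.length : Int) := by omega
  have hd2' : dq q' left1 right1 = dq q left1 right1 :=
    dq_set_of_lt q right'.toNat i (right1 + 1 - left1).toNat left1 right1 le_rfl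
      (by omega) (by omega)
  have hnew : dq q' left1 right' = dq q left1 right1 ++ [i] := by
    rw [dq_snoc q' (by omega : left1 ≤ right')]
    have h1 : right' - 1 = right1 := by omega
    rw [h1, hd2']
    have h2 : q'.getD right'.toNat 0 = i := by
      rw [hq']
      simp [List.getD_eq_getElem?_getD, List.getElem?_set_self (by omega : right'.toNat < q.length)]
    rw [h2]
  have hsub2 : List.Sublist (dq q left1 right1) (dq q left1 right) := by
    rw [hsuf]; exact List.sublist_append_left _ _
  have hd2mem : ∀ x ∈ dq q left1 right1, x ∈ dq q left1 right := fun x hx => by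
    rw [hsuf]; exact List.mem_append_left _ hx
  -- every surviving element has value ≥ val A i
  have hvge : ∀ x ∈ dq q left1 right1, val A i ≤ val A x := by
    intro x hx
    have hne2 : dq q left1 right1 ≠ [] := by intro h0; rw [h0] at hx; simp at hx
    have hl1r1 : left1 ≤ right1 := by
      by_contra h'
      exact hne2 (dq_nil (by omega))
    have hsnoc := dq_snoc q hl1r1
    have hlastv : val A i ≤ val A (q.getD right1.toNat 0) := by
      rcases hstopR with h' | h'
      · omega
      · omega
    rw [hsnoc] at hx
    rcases List.mem_append.mp hx with hx' | hx'
    · have hp := hPval.sublist (hsub2.trans hsubl)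
      rw [hsnoc] at hp
      have := (List.pairwise_append.mp hp).2.2 x hx' (q.getD right1.toNat 0) (by simp)
      omega
    · simp at hx'
      subst hx'
      exact hlastv
  -- ===== assemble the invariant at m+1 =====
  simp only [stepA]
  rw [← hleft1, ← hright1, ← hright', ← hq']
  have hd2b : ∀ x ∈ dq q left1 right1, 0 ≤ x ∧ i - N ≤ x ∧ x ≤ m := fun x hx =>
    hbounds1 x (hd2mem x hx)
  refine ⟨by simp only; omega, by simp only; omega, by simp only; omega, ?_, ?_, ?_, ?_, ?_, ?_, ?_⟩
  · simp only [hq', List.length_set]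
    exact hq
  · simp only
    rw [hnew]
    refine List.pairwise_append.mpr ⟨hPlt.sublist (hsub2.trans hsubl), by simp, ?_⟩
    intro x hx y hy
    simp at hy
    subst hy
    have := hd2b x hx
    omega
  · simp only
    rw [hnew]
    refine List.pairwise_append.mpr ⟨hPval.sublist (hsub2.trans hsubl), by simp, ?_⟩
    intro x hx y hy
    simp at hy
    subst hy
    exact hvge x hx
  · simp only
    rw [hnew, hidef]
    exact ⟨dq q left1 right1, rfl⟩
  · simp only
    intro x hx
    rw [hnew] at hx
    rcases List.mem_append.mp hx with hx' | hx'
    · have := hd2b x hx'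
      omega
    · simp at hx'
      subst hx'
      omega
  · simp only
    intro j hj0 hjN hjm
    by_cases hji : j = i
    · refine ⟨i, by rw [hnew]; simp, by omega, by rw [hji]⟩
    · have hjm' : j ≤ m := by omega
      obtain ⟨x, hx, hjx, hvjx⟩ := hcov j hj0 (by omega) hjm'
      have hxd1 : x ∈ dq q left1 right := by
        rw [hpre] at hx
        rcases List.mem_append.mp hx with hx' | hx'
        · exact absurd (hpreP x hx') (by omega)
        · exact hx'
      rw [hsuf] at hxd1
      rcases List.mem_append.mp hxd1 with hx2 | hx2
      · exact ⟨x, by rw [hnew]; exact List.mem_append_left _ hx2, hjx, hvjx⟩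
      · have hvx := hsufP x hx2
        refine ⟨i, by rw [hnew]; simp, by omega, by omega⟩
  · simp only
    rw [PySem.List.pyRange_one_succ_right (show (1:Int) ≤ m + 1 by omega),
      List.foldl_append]
    simp only [List.foldl_cons, List.foldl_nil]
    rw [← hres, ← hidef]
    exact hres'

lemma base_inv (A : List Int) (n N : Int) (L : Nat) (hL : (L : Int) = 2 * n + 1)
    (hN0 : 0 ≤ N) : DqInv A n N 0 (0, 1, 1, List.replicate L 0) := by
  have hget : ∀ t : Nat, (List.replicate L (0 : Int)).getD t 0 = 0 := by
    intro t
    simp [List.getD_eq_getElem?_getD, List.getElem?_replicate]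
    split <;> simp
  have hdq : dq (List.replicate L 0) 1 1 = [0] := by
    rw [dq_cons le_rfl, dq_nil (by omega), hget]
  refine ⟨le_rfl, le_rfl, by simp only; omega, by simpa using hL, ?_, ?_, ?_, ?_, ?_, ?_⟩
  · simp only; rw [hdq]; simp
  · simp only; rw [hdq]; simp
  · simp only; rw [hdq]; exact ⟨[], rfl⟩
  · simp only
    intro x hx
    rw [hdq] at hx
    simp at hx
    omega
  · simp only
    intro j hj0 hjN hjm
    have hj : j = 0 := by omega
    subst hj
    exact ⟨0, by rw [hdq]; simp, le_rfl, le_rfl⟩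
  · simp only
    rw [PySem.List.pyRange_one_eq_nil (by omega)]
    simp

theorem transport2_spec : Claim_equal_transport2 := by
  intro nums _
  unfold Spec_transport2 transport2 transport2_alt
  simp only
  have hA : (((0 : Int) :: (nums ++ nums)).length : Int) = 2 * (nums.length : Int) + 1 := by
    simp; ring
  set n : Int := (nums.length : Int) with hndef
  set N : Int := PySem.Int.floordiv n 2 with hNdef
  set A : List Int := 0 :: (nums ++ nums) with hAdef
  have hn : 0 ≤ n := Int.natCast_nonneg _
  have hNe : N = n / 2 := by rw [hNdef]; exact PySem.Int.floordiv_eq_ediv_of_pos (by omega)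
  have hN : 2 * N ≤ n ∧ n ≤ 2 * N + 1 := by omega
  by_cases hsmall : n + N ≤ 1
  · rw [PySem.List.pyRange_one_eq_nil hsmall]
    simp
  · have key : ∀ (k : Nat), 1 + (k : Int) ≤ n + N →
        DqInv A n N (k : Int)
          ((PySem.List.pyRange 1 (1 + (k : Int)) 1).foldl (stepA A N)
            (0, 1, 1, List.replicate (2 * nums.length + 1) 0)) := by
      intro k
      induction k with
      | zero =>
        intro hk
        rw [show ((0 : Nat) : Int) = 0 from rfl]
        rw [PySem.List.pyRange_one_eq_nil (by omega)]
        simp only [List.foldl_nil]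
        exact base_inv A n N (2 * nums.length + 1) (by push_cast; ring) (by omega)
      | succ k ih =>
        intro hk
        have hcast : (((k + 1 : Nat)) : Int) = (k : Int) + 1 := by push_cast; ring
        rw [hcast, show (1 : Int) + ((k : Int) + 1) = (1 + (k : Int)) + 1 from by ring,
          PySem.List.pyRange_one_succ_right (by omega), List.foldl_append]
        simp only [List.foldl_cons, List.foldl_nil]
        have hprev := ih (by omega)
        set st := (PySem.List.pyRange 1 (1 + (k : Int)) 1).foldl (stepA A N)
            (0, 1, 1, List.replicate (2 * nums.length + 1) 0) with hst
        have hsplit : st = (st.1, st.2.1, st.2.2.1, st.2.2.2) := rfl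
        rw [show (1 : Int) + (k : Int) = (k : Int) + 1 from by ring] at *
        rw [hsplit]
        exact step_inv A n N (k : Int) st.1 st.2.1 st.2.2.1 st.2.2.2 hA hN hn
          (by omega) (by omega) (hsplit ▸ hprev)
    have h := key (n + N - 1).toNat (by omega)
    rw [show (1 : Int) + ((n + N - 1).toNat : Int) = n + N from by omega] at h
    obtain ⟨_, _, _, _, _, _, _, _, _, hres⟩ := h
    rw [show (((n + N - 1).toNat : Int)) + 1 = n + N from by omega] at hres
    exact hres
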